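-- pv_equiv track=rewrite | github.com/ajarara/poyais | poyais/utility.py | _search
-- ===== SOURCE A (Python) =====
-- def _search(listing, absolute_idx):
--     """
--     Assuming the idx is in the string that generated the listing, find
--     the line that it was on.
--     """
--     if not listing:
--         return 0
--     if len(listing) == 1:
--         return 0 if absolute_idx <= listing[0] else 1
--
--     for idx, line_break_idx in enumerate(listing):
--         if line_break_idx >= absolute_idx:
--             return idx
-- ===== SOURCE B (Python) =====
-- def _search(listing, absolute_idx):
--     # Scan the break offsets back to front, keeping the earliest break at or
--     # after absolute_idx; the default (no such break) is the last line, len(listing).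
--     line = len(listing)
--     for i in range(len(listing) - 1, -1, -1):
--         if listing[i] >= absolute_idx:
--             line = i
--     return line
-- ===== Notes on version B (the rewrite author's own statement) =====
-- stated objective: simpler
-- what changed: A's forward early-return scan with two length special cases becomes a single back-to-front scan keeping the earliest break >= absolute_idx in an accumulator that defaults to len(listing); the empty and len==1 cases fall out of the same loop.
-- intended difference: On listings of length >= 2 whose breaks are all < absolute_idx, A falls off its loop and returns None, while B returns len(listing) - the line after the last break, which is intended (it is exactly what A's own len==1 branch returns in that situation). — e.g. on _search([0, 1], 5): A returns none, B returns some 2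
import Mathlib
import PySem

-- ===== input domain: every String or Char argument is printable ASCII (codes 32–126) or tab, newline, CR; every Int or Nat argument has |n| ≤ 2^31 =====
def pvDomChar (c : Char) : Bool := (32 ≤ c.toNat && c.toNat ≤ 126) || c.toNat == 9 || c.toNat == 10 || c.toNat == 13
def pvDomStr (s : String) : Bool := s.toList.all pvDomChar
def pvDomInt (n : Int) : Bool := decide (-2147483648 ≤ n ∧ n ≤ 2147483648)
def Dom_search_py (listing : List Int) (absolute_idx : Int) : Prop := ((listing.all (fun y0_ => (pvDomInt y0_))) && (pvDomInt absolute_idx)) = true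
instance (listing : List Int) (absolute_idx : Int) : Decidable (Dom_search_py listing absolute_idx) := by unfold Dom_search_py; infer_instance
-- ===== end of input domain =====

-- B replaces A's forward early-return scan plus two length special cases by a single
-- back-to-front scan with an accumulator defaulting to len(listing) (objective: simpler).

-- ===== PORT A =====
-- the 'for idx, line_break_idx in enumerate(listing)' loop: first index whose break is ≥ absolute_idx, else fall off (None)
def search_py_loop (absolute_idx : Int) : List (Int × Int) → Option Int
  | [] => none
  | (idx, line_break_idx) :: rest =>
      if line_break_idx ≥ absolute_idx then some idx else search_py_loop absolute_idx rest

def search_py (listing : List Int) (absolute_idx : Int) : Option Int :=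
  match listing with
  | [] => some 0                                  -- if not listing: return 0
  | [b] => if absolute_idx ≤ b then some 0 else some 1   -- len(listing) == 1 branch
  | _ => search_py_loop absolute_idx (PySem.List.enumerate listing 0)

-- ===== PORT B =====
def search_py_alt (listing : List Int) (absolute_idx : Int) : Option Int :=
  some ((PySem.List.pyRange ((listing.length : Int) - 1) (-1) (-1)).foldl
    (fun line i => if PySem.List.pyGetD listing i 0 ≥ absolute_idx then i else line)
    (listing.length : Int))

-- ===== PRECONDITION & SPEC =====
-- On listings of length ≥ 2 in which every break offset is < absolute_idx, A falls off
-- its loop and returns None, while B returns len(listing) — the line after the last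
-- break, the intended value and the one A itself returns in its len==1 branch.
def D_search_py (listing : List Int) (absolute_idx : Int) : Prop :=
  2 ≤ listing.length ∧ ∀ b ∈ listing, b < absolute_idx
instance (listing : List Int) (absolute_idx : Int) : Decidable (D_search_py listing absolute_idx) := by unfold D_search_py; infer_instance

def Spec_search_py (listing : List Int) (absolute_idx : Int) (out : Option Int) : Prop := ¬ D_search_py listing absolute_idx → out = search_py_alt listing absolute_idx
instance (listing : List Int) (absolute_idx : Int) (out : Option Int) : Decidable (Spec_search_py listing absolute_idx out) := by unfold Spec_search_py; infer_instance

def pvDiffWitness_search_py : List Int × Int := ([0, 1], 5)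
def pvDiffWitnessOut_search_py : (Option Int) × (Option Int) := (none, some 2)

-- ===== CLAIM (what is proved, stated in full; the proofs are below) =====
def Claim_unchanged_search_py : Prop := ∀ (listing : List Int) (absolute_idx : Int), Dom_search_py listing absolute_idx → Spec_search_py listing absolute_idx (search_py listing absolute_idx)
def Claim_changed_search_py : Prop := Dom_search_py (pvDiffWitness_search_py.1) (pvDiffWitness_search_py.2) ∧ D_search_py (pvDiffWitness_search_py.1) (pvDiffWitness_search_py.2) ∧ search_py (pvDiffWitness_search_py.1) (pvDiffWitness_search_py.2) = pvDiffWitnessOut_search_py.1 ∧ search_py_alt (pvDiffWitness_search_py.1) (pvDiffWitness_search_py.2) = pvDiffWitnessOut_search_py.2 ∧ pvDiffWitnessOut_search_py.1 ≠ pvDiffWitnessOut_search_py.2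
def Claim_exact_search_py : Prop := ∀ (listing : List Int) (absolute_idx : Int), Dom_search_py listing absolute_idx → D_search_py listing absolute_idx → search_py listing absolute_idx ≠ search_py_alt listing absolute_idx

-- ===== LEMMAS AND PROOFS =====

-- index of the first break ≥ x (the loop A runs and the write order of B's accumulator both reduce to it)
def pvFirstHit (x : Int) : List Int → Option Nat
  | [] => none
  | b :: rest => if x ≤ b then some 0 else (pvFirstHit x rest).map (· + 1)

theorem pvFirstHit_eq_none_iff (x : Int) (xs : List Int) :
    pvFirstHit x xs = none ↔ ∀ b ∈ xs, b < x := by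
  induction xs with
  | nil => simp [pvFirstHit]
  | cons c rest ih =>
    simp only [pvFirstHit, List.mem_cons]
    by_cases h : x ≤ c
    · simp only [if_pos h]
      constructor
      · intro hn; simp at hn
      · intro hall; exact absurd (hall c (Or.inl rfl)) (not_lt.mpr h)
    · simp only [if_neg h, Option.map_eq_none_iff, ih]
      constructor
      · intro hall b hb
        rcases hb with rfl | hb
        · exact not_le.mp h
        · exact hall b hb
      · intro hall b hb; exact hall b (Or.inr hb)

theorem pv_loop_eq (x : Int) (xs : List Int) (k : Int) :
    search_py_loop x (PySem.List.enumerate xs k)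
      = (pvFirstHit x xs).map (fun i => k + (i : Int)) := by
  induction xs generalizing k with
  | nil => simp [PySem.List.enumerate_nil, search_py_loop, pvFirstHit]
  | cons b rest ih =>
    rw [PySem.List.enumerate_cons]
    simp only [search_py_loop, pvFirstHit, ge_iff_le]
    by_cases h : x ≤ b
    · simp [h]
    · simp only [if_neg h, ih]
      cases pvFirstHit x rest with
      | none => simp
      | some i =>
        simp
        omega

theorem pv_foldr_range (x : Int) (xs : List Int) : ∀ (c s : Int),
    (List.range xs.length).foldr
      (fun (k : Nat) acc => if x ≤ PySem.List.pyGetD xs (k : Int) 0 then s + (k : Int) else acc) c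
      = (match pvFirstHit x xs with
         | some i => s + (i : Int)
         | none => c) := by
  induction xs with
  | nil => intro c s; simp [pvFirstHit]
  | cons b rest ih =>
    intro c s
    rw [List.length_cons, List.range_succ_eq_map, List.foldr_cons, List.foldr_map]
    have hinner :
        (List.range rest.length).foldr
          (fun (k : Nat) acc => if x ≤ PySem.List.pyGetD (b :: rest) ((k.succ : Nat) : Int) 0
                        then s + ((k.succ : Nat) : Int) else acc) c
        = (match pvFirstHit x rest with
           | some i => (s + 1) + (i : Int)
           | none => c) := by
      rw [← ih c (s + 1)]
      have hfun : (fun (k : Nat) acc => if x ≤ PySem.List.pyGetD (b :: rest) ((k.succ : Nat) : Int) 0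
                        then s + ((k.succ : Nat) : Int) else acc)
          = (fun (k : Nat) acc => if x ≤ PySem.List.pyGetD rest (k : Int) 0
                        then (s + 1) + (k : Int) else acc) := by
        funext k acc
        have hg : PySem.List.pyGetD (b :: rest) ((k.succ : Nat) : Int) 0
            = PySem.List.pyGetD rest (k : Int) 0 := by
          simp only [PySem.List.pyGetD_natCast, List.getD_cons_succ]
        rw [hg]
        congr 1
        push_cast
        ring
      rw [hfun]
    rw [hinner]
    simp only [pvFirstHit, Nat.cast_zero, PySem.List.pyGetD_zero_cons]
    by_cases h : x ≤ b
    · simp [h]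
    · simp only [if_neg h]
      cases pvFirstHit x rest with
      | none => simp
      | some i =>
        simp
        ring

theorem pv_fold_eq (x : Int) (xs : List Int) :
    search_py_alt xs x
      = some (match pvFirstHit x xs with
              | some i => (i : Int)
              | none => (xs.length : Int)) := by
  unfold search_py_alt
  have hrange : PySem.List.pyRange ((xs.length : Int) - 1) (-1) (-1)
      = (PySem.List.pyRange 0 (xs.length : Int) 1).reverse := by
    have := PySem.List.pyRange_neg_one_eq_reverse ((xs.length : Int) - 1) (-1)
    simpa using this
  rw [hrange, List.foldl_reverse, PySem.List.pyRange_zero_nat, List.foldr_map]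
  have h0 := pv_foldr_range x xs ((xs.length : Int)) 0
  simp only [zero_add] at h0
  simp only [ge_iff_le]
  rw [h0]

-- ===== VERDICT (by name: the statement is the Claim_ definition above) =====
theorem search_py_spec : Claim_unchanged_search_py := by
  intro listing x _ hD
  match listing with
  | [] => simp [search_py, pv_fold_eq, pvFirstHit]
  | [b] =>
    rw [pv_fold_eq]
    by_cases h : x ≤ b <;> simp [search_py, pvFirstHit, h]
  | a :: b :: rest =>
    rw [pv_fold_eq]
    unfold search_py
    rw [pv_loop_eq]
    have hlen : 2 ≤ (a :: b :: rest).length := by simp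
    have hx : ¬ ∀ c ∈ a :: b :: rest, c < x := fun hall => hD ⟨hlen, hall⟩
    have : pvFirstHit x (a :: b :: rest) ≠ none := by
      intro hn; exact hx ((pvFirstHit_eq_none_iff x _).mp hn)
    cases hfh : pvFirstHit x (a :: b :: rest) with
    | none => exact absurd hfh this
    | some i => simp
theorem search_py_changed : Claim_changed_search_py := by unfold Claim_changed_search_py; decide
theorem search_py_tight : Claim_exact_search_py := by
  intro listing x _ hD
  obtain ⟨hlen, hall⟩ := hD
  rw [pv_fold_eq, (pvFirstHit_eq_none_iff x listing).mpr hall]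
  match listing with
  | a :: b :: rest =>
    unfold search_py
    rw [pv_loop_eq, (pvFirstHit_eq_none_iff x (a :: b :: rest)).mpr hall]
    simp
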